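-- pv_equiv track=rewrite | github.com/Joshua-Montilla/csc_ | Code Jam/Coding.py | get_letters
-- ===== SOURCE A (Python) =====
-- def get_letters(word):
--     letters = []
--     temp = '_' * len(word)
--     if word == " ":
--         word.replace(" ", "")
--
--     for char in list(word):
--         if char not in letters:
--             letters.append(char)
--     character = " "
--
--     for num, char in enumerate(list(word)):
--         if char == character:
--             templist = list(temp)
--             templist[num] = char
--             temp = ''.join(templist)
--     return temp
-- ===== SOURCE B (Python) =====
-- def get_letters(word):
--     # Segment-level rewrite: split on the single space character, replace each
--     # piece by underscores of the same length, and let join put the spaces back.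
--     return ' '.join('_' * len(piece) for piece in word.split(' '))
-- ===== Notes on version B (the rewrite author's own statement) =====
-- stated objective: faster
-- what changed: Replaced A's dead dedup pass plus positional-overwrite loop (which rebuilds the whole string after every space found, quadratic in the number of spaces) with a single split on ' ', masking each piece with underscores of its length and rejoining with spaces.
import Mathlib
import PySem

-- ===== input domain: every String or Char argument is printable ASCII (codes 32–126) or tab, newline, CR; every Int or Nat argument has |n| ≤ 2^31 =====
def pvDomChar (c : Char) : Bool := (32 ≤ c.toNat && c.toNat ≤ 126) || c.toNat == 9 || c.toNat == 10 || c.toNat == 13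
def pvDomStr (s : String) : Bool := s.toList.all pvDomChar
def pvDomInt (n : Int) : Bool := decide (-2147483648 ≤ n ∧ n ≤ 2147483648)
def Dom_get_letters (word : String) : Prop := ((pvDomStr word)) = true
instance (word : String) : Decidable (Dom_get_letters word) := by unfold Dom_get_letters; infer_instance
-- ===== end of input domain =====

-- B replaces A's dead dedup pass and positional-overwrite loop by split-on-space / mask / join (measured faster; no observable mutation in either).

-- ===== PORT A =====
-- literal transliteration: temp as List Char (each ''.join is the same list-to-string round trip),
-- templist[num] = char is List.set (num is the enumerate index, always in range)
def get_letters (word : String) : String :=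
  let cs := word.toList
  let temp : List Char := List.replicate cs.length '_'
  let _discarded := if word == " " then PySem.Str.replace word " " "" else word  -- A's no-op 'word.replace(" ", "")' (result unused)
  let _letters := cs.foldl (fun acc c => if acc.contains c then acc else acc ++ [c]) ([] : List Char)  -- A's dead 'letters' loop
  let character := ' '
  let temp := (PySem.List.enumerate cs 0).foldl
      (fun t (p : Int × Char) => if p.2 == character then t.set p.1.toNat p.2 else t) temp
  String.ofList temp

-- ===== PORT B =====
-- '_' * len(piece) is List.replicate over the piece's characters
def get_letters_alt (word : String) : String :=
  match PySem.Str.split? word " " with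
  | some pieces =>
      PySem.Str.join " " (pieces.map (fun p => String.ofList (List.replicate p.toList.length '_')))
  | none => ""   -- unreachable: the separator " " is nonempty

-- ===== PRECONDITION & SPEC =====
def Spec_get_letters (word : String) (out : String) : Prop := out = get_letters_alt word
instance (word : String) (out : String) : Decidable (Spec_get_letters word out) := by unfold Spec_get_letters; infer_instance

-- ===== CLAIM (what is proved, stated in full; the proofs are below) =====
def Claim_equal_get_letters : Prop := ∀ (word : String), Dom_get_letters word → Spec_get_letters word (get_letters word)

-- ===== LEMMAS AND PROOFS =====

def pvMask (c : Char) : Char := if c == ' ' then ' ' else '_'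

-- reference split-on-one-space with a current-segment accumulator
def pvSplitAux : List Char → List Char → List (List Char)
  | [], cur => [cur.reverse]
  | c :: rest, cur => if c == ' ' then cur.reverse :: pvSplitAux rest [] else pvSplitAux rest (c :: cur)

theorem pvSplitAux_ne_nil (l cur : List Char) : ∃ q qs, pvSplitAux l cur = q :: qs := by
  induction l generalizing cur with
  | nil => exact ⟨cur.reverse, [], rfl⟩
  | cons c rest ih =>
      by_cases hc : c = ' '
      · exact ⟨cur.reverse, pvSplitAux rest [], by simp [pvSplitAux, hc]⟩
      · obtain ⟨q, qs, hq⟩ := ih (c :: cur)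
        exact ⟨q, qs, by simp [pvSplitAux, hc, hq]⟩

theorem pv_go_eq (fuel : Nat) (l cur : List Char) (acc : List (List Char)) (h : l.length < fuel) :
    PySem.Chars.splitOn.go [' '] fuel l cur acc = acc.reverse ++ pvSplitAux l cur := by
  induction fuel generalizing l cur acc with
  | zero => omega
  | succ fuel ih =>
      cases l with
      | nil => simp [PySem.Chars.splitOn.go, pvSplitAux]
      | cons c rest =>
          by_cases hc : c = ' '
          · subst hc
            simp only [PySem.Chars.splitOn.go, List.isPrefixOf, BEq.rfl, Bool.true_and,
              if_pos, List.length_cons, List.drop_succ_cons, List.length_nil, List.drop_zero]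
            rw [ih rest [] (List.reverse cur :: acc) (by simpa using Nat.lt_of_succ_lt_succ h)]
            simp [pvSplitAux]
          · have hpre : List.isPrefixOf [' '] (c :: rest) = false := by
              simp [List.isPrefixOf]; intro hco; exact absurd hco.symm hc
            simp only [PySem.Chars.splitOn.go, hpre, Bool.false_eq_true, if_false]
            rw [ih rest (c :: cur) acc (by simpa using Nat.lt_of_succ_lt_succ h)]
            simp [pvSplitAux, hc]

theorem pv_splitOn_eq (cs : List Char) : PySem.Chars.splitOn cs [' '] = pvSplitAux cs [] := by
  unfold PySem.Chars.splitOn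
  rw [pv_go_eq (cs.length + 1) cs [] [] (by omega)]
  simp

theorem pv_join_mask (l cur : List Char) :
    PySem.Chars.join [' '] ((pvSplitAux l cur).map (fun p => List.replicate p.length '_'))
      = List.replicate cur.length '_' ++ l.map pvMask := by
  induction l generalizing cur with
  | nil => simp [pvSplitAux, PySem.Chars.join, List.intercalate]
  | cons c rest ih =>
      by_cases hc : c = ' '
      · obtain ⟨q, qs, hq⟩ := pvSplitAux_ne_nil rest []
        subst hc
        have ih' := ih ([] : List Char)
        rw [hq] at ih'
        simp only [List.map_cons, List.length_nil, List.replicate_zero, List.nil_append] at ih'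
        simp only [pvSplitAux, beq_self_eq_true, if_true, hq, List.map_cons]
        rw [PySem.Chars.join_cons_cons, ih']
        simp [pvMask]
      · have ih' := ih (c :: cur)
        simp only [pvSplitAux, hc, beq_iff_eq, if_false, ih', List.length_cons,
          List.replicate_succ']
        simp [pvMask, hc]

theorem pv_A_loop (cs : List Char) :
    ∀ (t pre : List Char), t.length = cs.length →
    (PySem.List.enumerate cs (pre.length : Int)).foldl
        (fun tm (p : Int × Char) => if p.2 == ' ' then tm.set p.1.toNat p.2 else tm) (pre ++ t)
      = pre ++ List.zipWith (fun c d => if c == ' ' then ' ' else d) cs t := by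
  induction cs with
  | nil =>
      intro t pre ht
      have : t = [] := List.eq_nil_of_length_eq_zero ht
      simp [this, PySem.List.enumerate]
  | cons c cs ih =>
      intro t pre ht
      cases t with
      | nil => simp at ht
      | cons d t =>
          rw [PySem.List.enumerate_cons]
          simp only [List.foldl_cons, List.zipWith_cons_cons]
          have hset : (pre ++ d :: t).set (↑pre.length : Int).toNat ' ' = (pre ++ [' ']) ++ t := by
            simp
          by_cases hc : c = ' '
          · subst hc
            simp only [beq_self_eq_true, if_true, hset]
            have := ih t (pre ++ [' ']) (by simpa using Nat.succ_injective ht)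
            simp only [List.length_append, List.length_cons, List.length_nil, Nat.zero_add] at this ⊢
            push_cast at this ⊢
            rw [this]
            simp
          · have hcb : (c == ' ') = false := by simp [hc]
            simp only [hcb, Bool.false_eq_true, if_false]
            have := ih t (pre ++ [d]) (by simpa using Nat.succ_injective ht)
            simp only [List.length_append, List.length_cons, List.length_nil, Nat.zero_add] at this ⊢
            push_cast at this ⊢
            have hrw : pre ++ d :: t = (pre ++ [d]) ++ t := by simp
            rw [hrw, this]
            simp

theorem pv_zipWith_replicate (cs : List Char) :
    List.zipWith (fun c d => if c == ' ' then ' ' else d) cs (List.replicate cs.length '_')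
      = cs.map pvMask := by
  induction cs with
  | nil => rfl
  | cons c cs ih =>
      simp only [List.length_cons, List.replicate_succ, List.zipWith_cons_cons, List.map_cons]
      rw [ih]
      simp [pvMask]

theorem pv_A_eq (word : String) : get_letters word = String.ofList (word.toList.map pvMask) := by
  have h := pv_A_loop word.toList (List.replicate word.toList.length '_') [] (by simp)
  simp only [List.length_nil, Nat.cast_zero, List.nil_append] at h
  simp only [get_letters]
  rw [h, pv_zipWith_replicate]

theorem pv_B_eq (word : String) : get_letters_alt word = String.ofList (word.toList.map pvMask) := by
  unfold get_letters_alt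
  have hsep : (" " : String).toList = [' '] := rfl
  simp only [PySem.Str.split?, PySem.Chars.split?, hsep, List.isEmpty_cons, Bool.false_eq_true,
    if_false, Option.map_some]
  rw [pv_splitOn_eq]
  simp only [List.map_map]
  have hmaps : (pvSplitAux word.toList []).map
      ((fun p => String.ofList (List.replicate p.toList.length '_')) ∘ String.ofList)
      = (pvSplitAux word.toList []).map (fun q => String.ofList (List.replicate q.length '_')) := by
    apply List.map_congr_left
    intro q _
    simp
  rw [hmaps]
  unfold PySem.Str.join
  simp only [List.map_map, hsep]
  have hmaps2 : (pvSplitAux word.toList []).map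
      (String.toList ∘ fun q => String.ofList (List.replicate q.length '_'))
      = (pvSplitAux word.toList []).map (fun q => List.replicate q.length '_') := by
    apply List.map_congr_left
    intro q _
    simp
  rw [hmaps2, pv_join_mask]
  simp

-- ===== VERDICT (by name: the statement is the Claim_ definition above) =====
theorem get_letters_spec : Claim_equal_get_letters := by
  intro word _
  unfold Spec_get_letters
  rw [pv_A_eq, pv_B_eq]
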